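-- pv_equiv track=rewrite | github.com/srajsonu/CodeChef | March Long Challenge 2021/3. Interesting XOR!.py | solve
-- ===== SOURCE A (Python) =====
-- def solve(C):
--     A = "1"
--     B = "0"
--     C = bin(C).replace('0b', '')
--     for i in range(1, len(C)):
--         if C[i] == '0':
--             A += '1'
--             B += '1'
--         else:
--             A += '0'
--             B += '1'
--
--     return int(A, 2) * int(B, 2)
-- ===== SOURCE B (Python) =====
-- def solve(C):
--     # Closed form: for C >= 1 the two binary strings A builds have values
--     # 3*L - 1 - C and L - 1, where L is the highest power of two <= C.
--     if C == 0:
--         return 0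
--     L = 1 << (C.bit_length() - 1)
--     return (3 * L - 1 - C) * (L - 1)
-- ===== Notes on version B (the rewrite author's own statement) =====
-- stated objective: simpler
-- what changed: replaces the per-bit string-building loop and two base-2 reparses by the closed-form arithmetic formula (3*L-1-C)*(L-1) with L the highest power of two not exceeding C
-- outside the precondition, e.g. on solve(-5): A returns 70, B returns 48
import Mathlib
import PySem

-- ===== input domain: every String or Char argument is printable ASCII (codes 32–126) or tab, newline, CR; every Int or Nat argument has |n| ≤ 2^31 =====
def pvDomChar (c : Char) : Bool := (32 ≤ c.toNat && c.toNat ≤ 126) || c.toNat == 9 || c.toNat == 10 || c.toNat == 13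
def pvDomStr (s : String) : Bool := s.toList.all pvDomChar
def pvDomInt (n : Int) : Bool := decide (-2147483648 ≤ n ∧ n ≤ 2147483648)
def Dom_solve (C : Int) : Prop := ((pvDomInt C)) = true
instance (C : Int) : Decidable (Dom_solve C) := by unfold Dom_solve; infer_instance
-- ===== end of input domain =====

-- B replaces A's per-bit string-building loop and base-2 reparsing by the closed form
-- (3*L-1-C)*(L-1), L the highest power of two not exceeding C (simpler, loop-free).

-- ===== PORT A =====
-- Python's bin(n) for n ≥ 0, without the '0b' prefix: most-significant bit first.
def pvBin (n : Nat) : List Char :=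
  if n = 0 then ['0'] else (n.bits.map (fun b => if b then '1' else '0')).reverse

-- int(s, 2) for a string of '0'/'1' characters
def pvParseBin (l : List Char) : Int :=
  l.foldl (fun a c => 2 * a + (if c = '1' then 1 else 0)) 0

def solve (C : Int) : Int :=
  let s : List Char := if C < 0 then '-' :: pvBin C.natAbs else pvBin C.toNat
  let p := (s.drop 1).foldl
    (fun (p : List Char × List Char) c =>
      if c = '0' then (p.1 ++ ['1'], p.2 ++ ['1']) else (p.1 ++ ['0'], p.2 ++ ['1']))
    (['1'], ['0'])
  pvParseBin p.1 * pvParseBin p.2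

-- ===== PORT B =====
def solve_alt (C : Int) : Int :=
  if C = 0 then 0
  else
    -- 1 << (C.bit_length() - 1); Python's int.bit_length on |C| is Nat.size
    let L : Int := 2 ^ (Nat.size C.natAbs - 1)
    (3 * L - 1 - C) * (L - 1)

-- ===== PRECONDITION & SPEC =====
-- Pre_ excludes negative C, where A's loop treats the '-' sign emitted by bin() as a digit:
-- the value A returns there is an artefact of string handling, not a binary-number computation.
def Pre_solve (C : Int) : Prop := 0 ≤ C
instance (C : Int) : Decidable (Pre_solve C) := by unfold Pre_solve; infer_instance
def pvWitness_solve : Int := (6)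

def Spec_solve (C : Int) (out : Int) : Prop := out = solve_alt C
instance (C : Int) (out : Int) : Decidable (Spec_solve C out) := by unfold Spec_solve; infer_instance

-- ===== CLAIM (what is proved, stated in full; the proofs are below) =====
def Claim_equal_solve : Prop := ∀ (C : Int), Dom_solve C → Pre_solve C → Spec_solve C (solve C)

-- ===== LEMMAS AND PROOFS =====

-- value of a least-significant-bit-first list of bits
def lsbVal : List Bool → Int := fun l => l.foldr (fun b a => (if b then 1 else 0) + 2 * a) 0

theorem lsbVal_nil : lsbVal [] = 0 := rfl

theorem lsbVal_cons (b : Bool) (l : List Bool) :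
    lsbVal (b :: l) = (if b then 1 else 0) + 2 * lsbVal l := rfl

theorem lsbVal_append_single (u : List Bool) (b : Bool) :
    lsbVal (u ++ [b]) = lsbVal u + (if b then 1 else 0) * 2 ^ u.length := by
  induction u with
  | nil => simp [lsbVal]
  | cons a v ih =>
      simp only [List.cons_append, lsbVal_cons, ih, List.length_cons, pow_succ]
      ring

theorem lsbVal_not (u : List Bool) :
    lsbVal (u.map (fun b => !b)) = 2 ^ u.length - 1 - lsbVal u := by
  induction u with
  | nil => simp [lsbVal]
  | cons a v ih =>
      cases a <;> · simp [lsbVal_cons, ih, pow_succ]; ring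

theorem lsbVal_bits (n : Nat) : lsbVal n.bits = (n : Int) := by
  induction n using Nat.binaryRec' with
  | zero => simp [lsbVal]
  | bit b m h ih =>
      rw [Nat.bits_append_bit m b h, lsbVal_cons, ih]
      cases b <;> simp [Nat.bit] <;> push_cast <;> ring

theorem bits_getLast? (n : Nat) (h : n ≠ 0) : n.bits.getLast? = some true := by
  induction n using Nat.binaryRec' with
  | zero => exact absurd rfl h
  | bit b m hm ih =>
      rw [Nat.bits_append_bit m b hm]
      rcases Decidable.em (m = 0) with h0 | h0
      · subst h0; rw [hm rfl]; simp
      · rw [List.getLast?_cons, ih h0]; simp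

-- the loop of A appends the flipped bit to A and '1' to B, for every processed character
theorem foldl_build (l : List Char) (a b : List Char) :
    l.foldl (fun (p : List Char × List Char) c =>
        if c = '0' then (p.1 ++ ['1'], p.2 ++ ['1']) else (p.1 ++ ['0'], p.2 ++ ['1'])) (a, b)
      = (a ++ l.map (fun c => if c = '0' then '1' else '0'),
         b ++ l.map (fun _ => '1')) := by
  induction l generalizing a b with
  | nil => simp
  | cons c t ih =>
      by_cases hc : c = '0' <;> simp [hc, ih]

-- parsing the reversed (MSB-first) rendering of an LSB-first bit list
theorem parse_foldl_eq (u : List Bool) (a : Int) :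
    ((u.reverse.map (fun b => if b then '1' else '0')).foldl
        (fun a c => 2 * a + (if c = '1' then 1 else 0)) a)
      = a * 2 ^ u.length + lsbVal u := by
  induction u generalizing a with
  | nil => simp [lsbVal_nil]
  | cons b v ih =>
      simp only [List.reverse_cons, List.map_append, List.foldl_append, ih, List.map_cons,
        List.map_nil, List.foldl_cons, List.foldl_nil, List.length_cons, lsbVal_cons, pow_succ]
      cases b <;> simp <;> ring

theorem parse_msb (u : List Bool) (b : Bool) :
    pvParseBin ((u ++ [b]).reverse.map (fun b => if b then '1' else '0'))
      = lsbVal (u ++ [b]) := by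
  have := parse_foldl_eq (u ++ [b]) 0
  simpa [pvParseBin] using this

theorem map_not_reverse_map (u : List Bool) :
    (u.reverse.map (fun b => if b then '1' else '0')).map (fun c => if c = '0' then '1' else '0')
      = (u.map (fun b => !b)).reverse.map (fun b => if b then '1' else '0') := by
  induction u with
  | nil => rfl
  | cons b v ih => cases b <;> simp_all

theorem map_one_reverse_map (u : List Bool) :
    (u.reverse.map (fun b => if b then '1' else '0')).map (fun _ => '1')
      = ((List.replicate u.length true).reverse.map (fun b => if b then '1' else '0')) := by
  have h : ∀ l : List Char, l.map (fun _ => '1') = List.replicate l.length '1' := by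
    intro l; induction l with
    | nil => rfl
    | cons a t ih => simp [ih, List.replicate_succ]
  simp [h, List.reverse_replicate, List.map_replicate]

theorem lsbVal_replicate_true (k : Nat) :
    lsbVal (List.replicate k true) = 2 ^ k - 1 := by
  induction k with
  | zero => simp [lsbVal]
  | succ m ih => rw [List.replicate_succ, lsbVal_cons, ih]; simp [pow_succ]; ring

theorem solve_pos (C : Int) (h : 0 < C) : solve C = solve_alt C := by
  have hC0 : ¬ C < 0 := by omega
  have hne : C.natAbs ≠ 0 := by omega
  obtain ⟨u, hu⟩ := List.getLast?_eq_some_iff.mp (bits_getLast? C.natAbs hne)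
  have htoNat : C.toNat = C.natAbs := by omega
  have hcast : ((C.natAbs : Nat) : Int) = C := by omega
  have hk : Nat.size C.natAbs = u.length + 1 := by
    rw [← Nat.size_eq_bits_len, hu]; simp
  have hval : lsbVal u = C - 2 ^ u.length := by
    have h1 : lsbVal (Nat.bits C.natAbs) = (C.natAbs : Int) := lsbVal_bits _
    rw [hu, lsbVal_append_single, hcast] at h1
    simp at h1; linarith
  -- unfold A's port
  show (let s : List Char := if C < 0 then '-' :: pvBin C.natAbs else pvBin C.toNat
        let p := (s.drop 1).foldl
          (fun (p : List Char × List Char) c =>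
            if c = '0' then (p.1 ++ ['1'], p.2 ++ ['1']) else (p.1 ++ ['0'], p.2 ++ ['1']))
          (['1'], ['0'])
        pvParseBin p.1 * pvParseBin p.2) = solve_alt C
  simp only [hC0, if_false, htoNat]
  have hbin : pvBin C.natAbs
      = '1' :: (u.reverse.map (fun b => if b then '1' else '0')) := by
    rw [pvBin, if_neg hne, hu]
    simp
  rw [hbin]
  simp only [List.drop_succ_cons, List.drop_zero, foldl_build]
  -- A-side list equals the MSB rendering of (u.map not ++ [true])
  have hAlist : ['1'] ++ ((u.reverse.map (fun b => if b then '1' else '0')).map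
        (fun c => if c = '0' then '1' else '0'))
      = ((u.map (fun b => !b)) ++ [true]).reverse.map (fun b => if b then '1' else '0') := by
    rw [map_not_reverse_map]; simp
  have hBlist : ['0'] ++ ((u.reverse.map (fun b => if b then '1' else '0')).map (fun _ => '1'))
      = ((List.replicate u.length true) ++ [false]).reverse.map
          (fun b => if b then '1' else '0') := by
    rw [map_one_reverse_map]; simp
  rw [hAlist, hBlist, parse_msb, parse_msb, lsbVal_append_single, lsbVal_append_single,
    lsbVal_not, lsbVal_replicate_true]
  have hCne : ¬ C = 0 := by omega
  simp only [solve_alt, hCne, if_false, hk]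
  simp only [Nat.add_sub_cancel, List.length_map, List.length_replicate]
  rw [hval]
  push_cast
  ring

-- ===== VERDICT (by name: the statement is the Claim_ definition above) =====
theorem solve_spec : Claim_equal_solve := by
  intro C _ hpre
  unfold Spec_solve
  rcases lt_or_eq_of_le hpre with h | h
  · exact solve_pos C h
  · subst h; decide
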